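-- pv_equiv track=rewrite | github.com/rawmnr/ar-stitching | src/stitching/editable/_legacy_basis.py | _zernike_index_pairs
-- ===== SOURCE A (Python) =====
-- def _zernike_index_pairs(indexing: str, num_terms: int) -> list[tuple[int, int]]:
--     """Return mode pairs for standard real-valued Zernike orderings."""
--
--     indexing = indexing.lower()
--     if indexing == "iso":
--         return _iso_pairs(num_terms)
--
--     pairs: list[tuple[int, int]] = []
--     n = 0
--     while len(pairs) < num_terms:
--         if indexing == "ansi":
--             ordered_m = list(range(-n, n + 1, 2))
--         elif indexing == "noll":
--             if n % 2 == 0: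
--                 ordered_m = [0]
--                 for abs_m in range(2, n + 1, 2):
--                     ordered_m.extend((-abs_m, abs_m))
--             else:
--                 ordered_m = []
--                 for abs_m in range(1, n + 1, 2):
--                     ordered_m.extend((-abs_m, abs_m))
--         elif indexing == "fringe":
--             ordered_m = [0] if n % 2 == 0 else []
--             for abs_m in range(1 if n % 2 else 2, n + 1, 2):
--                 ordered_m.extend((abs_m, -abs_m))
--         else:
--             raise ValueError(f"Unsupported Zernike indexing '{indexing}'.")
--
--         for m in ordered_m:
--             pairs.append((n, m))
--             if len(pairs) == num_terms:
--                 break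
--         n += 1
--     return pairs
--
-- def _iso_pairs(num_terms: int) -> list[tuple[int, int]]:
--     """Enumerate ISO/legacy Zernike (n, m) pairs."""
--
--     pairs: list[tuple[int, int]] = []
--     no = 0
--     while len(pairs) < num_terms:
--         for n in range(no // 2, no + 1):
--             m = no - n
--             pairs.append((n, m))
--             if len(pairs) == num_terms:
--                 break
--             if m != 0:
--                 pairs.append((n, -m))
--                 if len(pairs) == num_terms:
--                     break
--         no += 2
--     return pairs
-- ===== SOURCE B (Python) =====
-- from math import isqrt
--
--
-- def _tri_locate(j: int) -> tuple[int, int]: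
--     """Invert the triangular numbering: j -> (row n, offset r within the row)."""
--     n = (isqrt(8 * j + 1) - 1) // 2
--     return n, j - n * (n + 1) // 2
--
--
-- def _pair_ansi(j: int) -> tuple[int, int]:
--     n, r = _tri_locate(j)
--     return (n, 2 * r - n)
--
--
-- def _pair_noll(j: int) -> tuple[int, int]:
--     n, r = _tri_locate(j)
--     if n % 2 == 0:
--         if r == 0:
--             return (n, 0)
--         a = 2 * ((r + 1) // 2)
--         return (n, -a if r % 2 else a)
--     a = 2 * (r // 2) + 1
--     return (n, -a if r % 2 == 0 else a)
--
--
-- def _pair_fringe(j: int) -> tuple[int, int]: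
--     n, r = _tri_locate(j)
--     if n % 2 == 0:
--         if r == 0:
--             return (n, 0)
--         a = 2 * ((r + 1) // 2)
--         return (n, a if r % 2 else -a)
--     a = 2 * (r // 2) + 1
--     return (n, a if r % 2 == 0 else -a)
--
--
-- def _pair_iso(j: int) -> tuple[int, int]:
--     t = isqrt(j)           # row index: the row of order no = 2*t starts at t*t
--     r = j - t * t
--     n = t + r // 2
--     m = 2 * t - n
--     return (n, -m if r % 2 else m)
--
--
-- _PAIR_FUNCS = {"iso": _pair_iso, "ansi": _pair_ansi, "noll": _pair_noll, "fringe": _pair_fringe}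
--
--
-- def _zernike_index_pairs(indexing: str, num_terms: int) -> list[tuple[int, int]]:
--     """Return mode pairs for standard real-valued Zernike orderings."""
--
--     if num_terms <= 0:
--         return []
--     try:
--         pair = _PAIR_FUNCS[indexing.lower()]
--     except KeyError:
--         raise ValueError(f"Unsupported Zernike indexing '{indexing.lower()}'.")
--     return [pair(j) for j in range(num_terms)]
-- ===== Notes on version B (the rewrite author's own statement) =====
-- stated objective: alternative
-- what changed: A accumulates rows in a while-loop with per-append length checks and breaks; B computes the j-th (n,m) pair directly in closed form by inverting the triangular/square row numbering with math.isqrt and maps that over range(num_terms).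
import Mathlib
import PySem

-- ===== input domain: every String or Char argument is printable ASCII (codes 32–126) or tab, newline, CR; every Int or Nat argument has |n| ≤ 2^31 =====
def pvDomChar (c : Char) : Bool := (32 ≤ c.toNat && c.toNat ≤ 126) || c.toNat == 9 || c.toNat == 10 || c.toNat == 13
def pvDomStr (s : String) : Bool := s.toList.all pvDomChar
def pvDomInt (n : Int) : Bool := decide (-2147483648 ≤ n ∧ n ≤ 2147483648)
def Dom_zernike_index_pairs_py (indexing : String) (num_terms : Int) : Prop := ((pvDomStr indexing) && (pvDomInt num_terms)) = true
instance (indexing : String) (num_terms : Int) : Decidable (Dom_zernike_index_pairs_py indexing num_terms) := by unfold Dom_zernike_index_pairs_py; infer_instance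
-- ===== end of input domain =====

-- B replaces A's accumulate-rows-until-full loop by a closed-form index inversion: the j-th
-- pair is computed directly from j with math.isqrt (triangular / square numbering inverted),
-- and the result is a single map over range(num_terms) (alternative algorithm, same cost).

-- ===== PORT A =====
-- A's inner 'for m in ordered_m' loop: append (n, m), break when len(pairs) == num_terms
def pvInnerA (n T : Int) (pairs : List (Int × Int)) : List Int → List (Int × Int)
  | [] => pairs
  | m :: ms =>
    let p1 := pairs ++ [(n, m)]
    if (p1.length : Int) = T then p1 else pvInnerA n T p1 ms

-- A's per-iteration ordered_m for the ansi / noll / fringe branches (foldl = the extend loops)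
def pvOrderedM (key : String) (n : Int) : List Int :=
  if key = "ansi" then PySem.List.pyRange (-n) (n + 1) 2
  else if key = "noll" then
    if PySem.Int.mod n 2 = 0 then
      (PySem.List.pyRange 2 (n + 1) 2).foldl (fun acc a => acc ++ [-a, a]) [0]
    else
      (PySem.List.pyRange 1 (n + 1) 2).foldl (fun acc a => acc ++ [-a, a]) []
  else
    (PySem.List.pyRange (if PySem.Int.mod n 2 ≠ 0 then 1 else 2) (n + 1) 2).foldl
      (fun acc a => acc ++ [a, -a]) (if PySem.Int.mod n 2 = 0 then [0] else [])

theorem pvInnerA_length_le (n T : Int) (pairs : List (Int × Int)) (ms : List Int) :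
    pairs.length ≤ (pvInnerA n T pairs ms).length := by
  induction ms generalizing pairs with
  | nil => simp [pvInnerA]
  | cons m ms ih =>
    simp only [pvInnerA]
    split
    · simp
    · exact le_trans (by simp) (ih (pairs ++ [(n, m)]))

theorem pvInnerA_length_lt (n T : Int) (pairs : List (Int × Int)) (ms : List Int)
    (hms : ms ≠ []) : pairs.length < (pvInnerA n T pairs ms).length := by
  cases ms with
  | nil => exact absurd rfl hms
  | cons m ms =>
    simp only [pvInnerA]
    split
    · simp
    · exact lt_of_lt_of_le (by simp) (pvInnerA_length_le n T (pairs ++ [(n, m)]) ms)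

-- A's 'while len(pairs) < num_terms' loop for ansi / noll / fringe; the unknown-indexing
-- branch raises ValueError in Python (outside Pre_ whenever it is reached); the
-- 'ordered_m = []' branch is a totality guard only (ordered_m is never empty for n ≥ 0).
def pvLoopA (key : String) (T : Int) (pairs : List (Int × Int)) (n : Int) : List (Int × Int) :=
  if h : (pairs.length : Int) < T then
    if key = "ansi" ∨ key = "noll" ∨ key = "fringe" then
      if hms : pvOrderedM key n = [] then pairs
      else pvLoopA key T (pvInnerA n T pairs (pvOrderedM key n)) (n + 1)
    else pairs
  else pairs
termination_by (T - pairs.length).toNat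
decreasing_by
  have := pvInnerA_length_lt n T pairs (pvOrderedM key n) hms
  omega

-- _iso_pairs: inner 'for n in range(no // 2, no + 1)' loop with its two break checks
def pvInnerIso (no T : Int) (pairs : List (Int × Int)) : List Int → List (Int × Int)
  | [] => pairs
  | n :: ns =>
    let m := no - n
    let p1 := pairs ++ [(n, m)]
    if (p1.length : Int) = T then p1
    else if m ≠ 0 then
      let p2 := p1 ++ [(n, -m)]
      if (p2.length : Int) = T then p2 else pvInnerIso no T p2 ns
    else pvInnerIso no T p1 ns

theorem pvInnerIso_length_le (no T : Int) (pairs : List (Int × Int)) (ns : List Int) :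
    pairs.length ≤ (pvInnerIso no T pairs ns).length := by
  induction ns generalizing pairs with
  | nil => simp [pvInnerIso]
  | cons n ns ih =>
    simp only [pvInnerIso]
    split
    · simp
    · split
      · split
        · simp
        · exact le_trans (by simp) (ih _)
      · exact le_trans (by simp) (ih _)

theorem pvInnerIso_length_lt (no T : Int) (pairs : List (Int × Int)) (ns : List Int)
    (hns : ns ≠ []) : pairs.length < (pvInnerIso no T pairs ns).length := by
  cases ns with
  | nil => exact absurd rfl hns
  | cons n ns =>
    simp only [pvInnerIso]
    split
    · simp
    · split
      · split
        · simp
        · exact lt_of_lt_of_le (by simp) (pvInnerIso_length_le no T _ ns)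
      · exact lt_of_lt_of_le (by simp) (pvInnerIso_length_le no T _ ns)

-- _iso_pairs' outer 'while' loop ('rng = []' is a totality guard only: the range is
-- nonempty for every no ≥ 0 reached by the loop)
def pvLoopIso (T : Int) (pairs : List (Int × Int)) (no : Int) : List (Int × Int) :=
  if h : (pairs.length : Int) < T then
    if hr : PySem.List.pyRange (PySem.Int.floordiv no 2) (no + 1) 1 = [] then pairs
    else pvLoopIso T
      (pvInnerIso no T pairs (PySem.List.pyRange (PySem.Int.floordiv no 2) (no + 1) 1)) (no + 2)
  else pairs
termination_by (T - pairs.length).toNat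
decreasing_by
  have := pvInnerIso_length_lt no T pairs _ hr
  omega

def zernike_index_pairs_py (indexing : String) (num_terms : Int) : List (Int × Int) :=
  let key := PySem.Str.lower indexing
  if key = "iso" then pvLoopIso num_terms [] 0
  else pvLoopA key num_terms [] 0

-- ===== PORT B =====
-- math.isqrt; B only ever calls it on j ≥ 0 (Python raises on negative arguments)
def pvIsqrt (j : Int) : Int := (Nat.sqrt j.toNat : Int)

-- _tri_locate: invert the triangular numbering, j -> (row n, offset r)
def pvTriLocate (j : Int) : Int × Int :=
  let n := PySem.Int.floordiv (pvIsqrt (8 * j + 1) - 1) 2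
  (n, j - PySem.Int.floordiv (n * (n + 1)) 2)

def pvPairAnsi (j : Int) : Int × Int :=
  let nr := pvTriLocate j
  (nr.1, 2 * nr.2 - nr.1)

def pvPairNoll (j : Int) : Int × Int :=
  let nr := pvTriLocate j
  let n := nr.1
  let r := nr.2
  if PySem.Int.mod n 2 = 0 then
    if r = 0 then (n, 0)
    else
      let a := 2 * PySem.Int.floordiv (r + 1) 2
      if PySem.Int.mod r 2 ≠ 0 then (n, -a) else (n, a)
  else
    let a := 2 * PySem.Int.floordiv r 2 + 1
    if PySem.Int.mod r 2 = 0 then (n, -a) else (n, a)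

def pvPairFringe (j : Int) : Int × Int :=
  let nr := pvTriLocate j
  let n := nr.1
  let r := nr.2
  if PySem.Int.mod n 2 = 0 then
    if r = 0 then (n, 0)
    else
      let a := 2 * PySem.Int.floordiv (r + 1) 2
      if PySem.Int.mod r 2 ≠ 0 then (n, a) else (n, -a)
  else
    let a := 2 * PySem.Int.floordiv r 2 + 1
    if PySem.Int.mod r 2 = 0 then (n, a) else (n, -a)

def pvPairIso (j : Int) : Int × Int :=
  let t := pvIsqrt j
  let r := j - t * t
  let n := t + PySem.Int.floordiv r 2
  let m := 2 * t - n
  if PySem.Int.mod r 2 ≠ 0 then (n, -m) else (n, m)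

-- the dict dispatch of Source B, ported as a first-match conditional (exact: the keys are distinct
-- literals); the final branch is Source B's KeyError -> ValueError (outside Pre_)
def zernike_index_pairs_py_alt (indexing : String) (num_terms : Int) : List (Int × Int) :=
  if num_terms ≤ 0 then []
  else
    let key := PySem.Str.lower indexing
    if key = "iso" then (PySem.List.pyRange 0 num_terms 1).map pvPairIso
    else if key = "ansi" then (PySem.List.pyRange 0 num_terms 1).map pvPairAnsi
    else if key = "noll" then (PySem.List.pyRange 0 num_terms 1).map pvPairNoll
    else if key = "fringe" then (PySem.List.pyRange 0 num_terms 1).map pvPairFringe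
    else []

-- ===== PRECONDITION & SPEC =====
-- Pre_ excludes exactly the inputs where A raises ValueError: an indexing whose lowercase form
-- is none of iso/ansi/noll/fringe together with num_terms > 0 (B raises there too).
def Pre_zernike_index_pairs_py (indexing : String) (num_terms : Int) : Prop :=
  num_terms ≤ 0 ∨ PySem.Str.lower indexing = "iso" ∨ PySem.Str.lower indexing = "ansi" ∨
    PySem.Str.lower indexing = "noll" ∨ PySem.Str.lower indexing = "fringe"
instance (indexing : String) (num_terms : Int) : Decidable (Pre_zernike_index_pairs_py indexing num_terms) := by unfold Pre_zernike_index_pairs_py; infer_instance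

def pvWitness_zernike_index_pairs_py : String × Int := ("ansi", 6)

def Spec_zernike_index_pairs_py (indexing : String) (num_terms : Int) (out : List (Int × Int)) : Prop := out = zernike_index_pairs_py_alt indexing num_terms
instance (indexing : String) (num_terms : Int) (out : List (Int × Int)) : Decidable (Spec_zernike_index_pairs_py indexing num_terms out) := by unfold Spec_zernike_index_pairs_py; infer_instance

-- ===== CLAIM (what is proved, stated in full; the proofs are below) =====
def Claim_equal_zernike_index_pairs_py : Prop := ∀ (indexing : String) (num_terms : Int), Dom_zernike_index_pairs_py indexing num_terms → Pre_zernike_index_pairs_py indexing num_terms → Spec_zernike_index_pairs_py indexing num_terms (zernike_index_pairs_py indexing num_terms)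

-- ===== LEMMAS AND PROOFS =====

-- ---------- generic helpers ----------

def pvTri (n : Nat) : Nat := n * (n + 1) / 2

theorem pvTri_succ (n : Nat) : pvTri (n + 1) = pvTri n + (n + 1) := by
  obtain ⟨t, ht⟩ := (Nat.even_mul_succ_self n).two_dvd
  have h2 : (n + 1) * (n + 1 + 1) = 2 * t + 2 * (n + 1) := by rw [← ht]; ring
  unfold pvTri
  omega

theorem pvTri_ge (n : Nat) : n ≤ pvTri n := by
  induction n with
  | zero => simp [pvTri]
  | succ k ih => rw [pvTri_succ]; omega

theorem pvSq_ge (n : Nat) : n ≤ n * n := by nlinarith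

-- split an even range into 2-blocks
theorem pvRange_two_blocks {α : Type} (f : Nat → α) (q : Nat) :
    (List.range (2 * q)).map f = (List.range q).flatMap (fun k => [f (2 * k), f (2 * k + 1)]) := by
  induction q with
  | zero => simp
  | succ k ih =>
    have h : 2 * (k + 1) = (2 * k + 1) + 1 := by ring
    rw [h, List.range_succ, List.range_succ, List.range_succ, List.map_append, List.map_append,
      ih, List.flatMap_append]
    simp

-- step-2 Python range as a mapped List.range
theorem pvPyRange_two (a : Int) (c : Nat) :
    PySem.List.pyRange a (a + 2 * c - 1) 2 = (List.range c).map (fun (k : Nat) => a + 2 * (k : Int)) := by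
  rw [PySem.List.pyRange_of_pos _ _ (by norm_num : (0:Int) < 2)]
  rcases Nat.eq_zero_or_pos c with hc | hc
  · subst hc
    have h0 : ¬ (a < a + 2 * (0:Nat) - 1) := by push_cast; omega
    simp [h0]
  · have hlt : a < a + 2 * c - 1 := by push_cast; omega
    rw [if_pos hlt]
    have h3 : ((a + 2 * c - 1 - a + 2 - 1) / 2).toNat = c := by push_cast; omega
    rw [h3]

-- mod/floordiv on Nat casts
theorem pvMod2_natCast (n : Nat) : PySem.Int.mod (n : Int) 2 = ((n % 2 : Nat) : Int) := by
  rw [PySem.Int.mod_eq_emod_of_pos (by norm_num)]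
  push_cast
  omega

theorem pvFloordiv2_natCast (n : Nat) : PySem.Int.floordiv (n : Int) 2 = ((n / 2 : Nat) : Int) := by
  exact_mod_cast PySem.Int.floordiv_natCast n 2

-- ---------- closed-form locators ----------

theorem pvTriLocate_eq (n i : Nat) (h : i ≤ n) :
    pvTriLocate ((pvTri n + i : Nat) : Int) = ((n : Int), (i : Int)) := by
  obtain ⟨t, ht⟩ := (Nat.even_mul_succ_self n).two_dvd
  have htri : pvTri n = t := by unfold pvTri; omega
  have harg : ((8 * ((pvTri n + i : Nat) : Int) + 1)).toNat = 8 * (pvTri n + i) + 1 := by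
    push_cast; omega
  set s := Nat.sqrt (8 * (pvTri n + i) + 1) with hs
  have hlow : 2 * n + 1 ≤ s := by
    refine Nat.le_sqrt.mpr ?_
    have e : (2 * n + 1) * (2 * n + 1) = 4 * (n * (n + 1)) + 1 := by ring
    omega
  have hhigh : s < 2 * n + 3 := by
    refine Nat.sqrt_lt.mpr ?_
    have e : (2 * n + 3) * (2 * n + 3) = 4 * (n * (n + 1)) + 8 * n + 9 := by ring
    omega
  have hfd : PySem.Int.floordiv ((s : Int) - 1) 2 = (n : Int) := by
    rw [show ((s : Int) - 1) = ((s - 1 : Nat) : Int) by omega, pvFloordiv2_natCast]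
    have : (s - 1) / 2 = n := by omega
    rw [this]
  have hfd2 : PySem.Int.floordiv ((n : Int) * ((n : Int) + 1)) 2 = ((pvTri n : Nat) : Int) := by
    rw [show ((n : Int) * ((n : Int) + 1)) = ((n * (n + 1) : Nat) : Int) by push_cast; ring,
      pvFloordiv2_natCast]
    unfold pvTri
    rfl
  simp only [pvTriLocate, pvIsqrt, harg, ← hs, hfd, hfd2, Prod.mk.injEq, true_and]
  push_cast
  omega

theorem pvIsoSqrt (k i : Nat) (h : i ≤ 2 * k) : Nat.sqrt (k * k + i) = k := by
  have hle : k ≤ Nat.sqrt (k * k + i) := Nat.le_sqrt.mpr (by omega)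
  have hlt : Nat.sqrt (k * k + i) < k + 1 := by
    refine Nat.sqrt_lt.mpr ?_
    have e : (k + 1) * (k + 1) = k * k + 2 * k + 1 := by ring
    omega
  omega

theorem pvPairIso_eq (k i : Nat) (h : i ≤ 2 * k) :
    pvPairIso ((k * k + i : Nat) : Int) =
      ((k : Int) + ((i / 2 : Nat) : Int),
        if i % 2 = 1 then -((k : Int) - ((i / 2 : Nat) : Int))
        else (k : Int) - ((i / 2 : Nat) : Int)) := by
  have harg : (((k * k + i : Nat) : Int)).toNat = k * k + i := by push_cast; omega
  have hr : ((k * k + i : Nat) : Int) - (k : Int) * (k : Int) = ((i : Nat) : Int) := by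
    push_cast; ring
  simp only [pvPairIso, pvIsqrt, harg, pvIsoSqrt k i h, hr, pvFloordiv2_natCast,
    pvMod2_natCast]
  rcases Nat.mod_two_eq_zero_or_one i with hp | hp <;>
    simp [hp, Prod.ext_iff] <;> push_cast <;> omega


-- ---------- pointwise evaluation of B's pair functions on a row ----------

theorem pvPairNoll_even (n i : Nat) (hn : n % 2 = 0) (h : i ≤ n) :
    pvPairNoll ((pvTri n + i : Nat) : Int) =
      if i = 0 then ((n : Int), 0)
      else if i % 2 = 1 then ((n : Int), -(2 * (((i + 1) / 2 : Nat) : Int)))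
      else ((n : Int), 2 * (((i + 1) / 2 : Nat) : Int)) := by
  have h1 : PySem.Int.mod ((n : Int)) 2 = 0 := by rw [pvMod2_natCast, hn]; rfl
  have h3 : PySem.Int.floordiv ((i : Int) + 1) 2 = (((i + 1) / 2 : Nat) : Int) := by
    rw [show ((i : Int) + 1) = ((i + 1 : Nat) : Int) by push_cast; ring]
    exact pvFloordiv2_natCast (i + 1)
  simp only [pvPairNoll, pvTriLocate_eq n i h, h1, h3, pvMod2_natCast, if_true]
  by_cases hi0 : i = 0
  · simp [hi0]
  · rcases Nat.mod_two_eq_zero_or_one i with hp | hp <;> simp [hi0, hp]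

theorem pvPairNoll_odd (n i : Nat) (hn : n % 2 = 1) (h : i ≤ n) :
    pvPairNoll ((pvTri n + i : Nat) : Int) =
      if i % 2 = 0 then ((n : Int), -(2 * ((i / 2 : Nat) : Int) + 1))
      else ((n : Int), 2 * ((i / 2 : Nat) : Int) + 1) := by
  have h1 : PySem.Int.mod ((n : Int)) 2 = 1 := by rw [pvMod2_natCast, hn]; rfl
  simp only [pvPairNoll, pvTriLocate_eq n i h, h1, pvFloordiv2_natCast, pvMod2_natCast]
  rcases Nat.mod_two_eq_zero_or_one i with hp | hp <;> simp [hp]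

theorem pvPairFringe_even (n i : Nat) (hn : n % 2 = 0) (h : i ≤ n) :
    pvPairFringe ((pvTri n + i : Nat) : Int) =
      if i = 0 then ((n : Int), 0)
      else if i % 2 = 1 then ((n : Int), 2 * (((i + 1) / 2 : Nat) : Int))
      else ((n : Int), -(2 * (((i + 1) / 2 : Nat) : Int))) := by
  have h1 : PySem.Int.mod ((n : Int)) 2 = 0 := by rw [pvMod2_natCast, hn]; rfl
  have h3 : PySem.Int.floordiv ((i : Int) + 1) 2 = (((i + 1) / 2 : Nat) : Int) := by
    rw [show ((i : Int) + 1) = ((i + 1 : Nat) : Int) by push_cast; ring]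
    exact pvFloordiv2_natCast (i + 1)
  simp only [pvPairFringe, pvTriLocate_eq n i h, h1, h3, pvMod2_natCast, if_true]
  by_cases hi0 : i = 0
  · simp [hi0]
  · rcases Nat.mod_two_eq_zero_or_one i with hp | hp <;> simp [hi0, hp]

theorem pvPairFringe_odd (n i : Nat) (hn : n % 2 = 1) (h : i ≤ n) :
    pvPairFringe ((pvTri n + i : Nat) : Int) =
      if i % 2 = 0 then ((n : Int), 2 * ((i / 2 : Nat) : Int) + 1)
      else ((n : Int), -(2 * ((i / 2 : Nat) : Int) + 1)) := by
  have h1 : PySem.Int.mod ((n : Int)) 2 = 1 := by rw [pvMod2_natCast, hn]; rfl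
  simp only [pvPairFringe, pvTriLocate_eq n i h, h1, pvFloordiv2_natCast, pvMod2_natCast]
  rcases Nat.mod_two_eq_zero_or_one i with hp | hp <;> simp [hp]

-- ---------- rows of the A-side enumeration ----------

def pvChunk (no n : Int) : List (Int × Int) :=
  if no - n = 0 then [(n, no - n)] else [(n, no - n), (n, -(no - n))]

def pvRowM (key : String) (n : Nat) : List (Int × Int) :=
  (pvOrderedM key (n : Int)).map (fun m => ((n : Int), m))

def pvRowIso (k : Nat) : List (Int × Int) :=
  (PySem.List.pyRange (k : Int) (2 * (k : Int) + 1) 1).flatMap (pvChunk (2 * (k : Int)))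

-- ---------- row lemmas: B's closed form produces exactly each row ----------

theorem pvRow_ansi (n : Nat) :
    (List.range (n + 1)).map (fun i => pvPairAnsi ((pvTri n + i : Nat) : Int)) =
      pvRowM "ansi" n := by
  unfold pvRowM pvOrderedM
  rw [show ((n : Int) + 1) = -(n : Int) + 2 * ((n + 1 : Nat) : Int) - 1 by push_cast; ring]
  rw [if_pos rfl, pvPyRange_two (-(n : Int)) (n + 1), List.map_map]
  refine List.map_congr_left (fun i hi => ?_)
  have hi' : i ≤ n := by simpa [Nat.lt_succ_iff] using hi
  simp only [pvPairAnsi, pvTriLocate_eq n i hi', Function.comp, Prod.mk.injEq, true_and]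
  omega

theorem pvRow_noll (n : Nat) :
    (List.range (n + 1)).map (fun i => pvPairNoll ((pvTri n + i : Nat) : Int)) =
      pvRowM "noll" n := by
  unfold pvRowM pvOrderedM
  rw [if_neg (by decide), if_pos rfl]
  rcases Nat.even_or_odd n with he | ho
  · obtain ⟨q, hq⟩ := he
    have hn : n = 2 * q := by omega
    have hmod : PySem.Int.mod (n : Int) 2 = 0 := by
      rw [pvMod2_natCast, show n % 2 = 0 by omega]; rfl
    rw [if_pos hmod, PySem.List.foldl_append_eq_flatMap,
      show ((n : Int) + 1) = 2 + 2 * ((q : Nat) : Int) - 1 by push_cast; omega,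
      pvPyRange_two 2 q,
      show n + 1 = 2 * q + 1 by omega, List.range_succ_eq_map, List.map_cons, List.map_map,
      pvRange_two_blocks]
    simp only [List.singleton_append, List.map_cons, List.map_flatMap, List.flatMap_map,
      List.map_map, List.map_cons, List.map_nil, Function.comp]
    congr 1
    · rw [show pvTri n + 0 = pvTri n + 0 from rfl,
        pvPairNoll_even n 0 (by omega) (Nat.zero_le n)]
      simp
    · refine List.flatMap_congr (fun k hk => ?_)
      have hkq : k < q := List.mem_range.mp hk
      rw [show 2 * k + 1 = 2 * k + 1 from rfl]
      rw [pvPairNoll_even n (2 * k + 1) (by omega) (by omega),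
        pvPairNoll_even n (2 * k + 1 + 1) (by omega) (by omega)]
      have e1 : (2 * k + 1) % 2 = 1 := by omega
      have e2 : (2 * k + 1 + 1) % 2 = 0 := by omega
      have e3 : (2 * k + 1 + 1) / 2 = k + 1 := by omega
      have e4 : (2 * k + 1 + 1 + 1) / 2 = k + 1 := by omega
      rw [if_neg (by omega : ¬ (2 * k + 1 = 0)), if_neg (by omega : ¬ (2 * k + 1 + 1 = 0)),
        e1, e2, e3, e4, if_pos rfl, if_neg (by omega : ¬ (0 = 1))]
      simp only [List.cons.injEq, Prod.mk.injEq, and_true, true_and]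
      push_cast
      omega
  · obtain ⟨q, hq⟩ := ho
    have hmod : ¬ PySem.Int.mod (n : Int) 2 = 0 := by
      rw [pvMod2_natCast, show n % 2 = 1 by omega]; norm_num
    rw [if_neg hmod, PySem.List.foldl_append_eq_flatMap,
      show ((n : Int) + 1) = 1 + 2 * ((q + 1 : Nat) : Int) - 1 by push_cast; omega,
      pvPyRange_two 1 (q + 1),
      show n + 1 = 2 * (q + 1) by omega, pvRange_two_blocks]
    simp only [List.nil_append, List.map_flatMap, List.flatMap_map, List.map_cons,
      List.map_nil, Function.comp]
    refine List.flatMap_congr (fun k hk => ?_)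
    have hkq : k < q + 1 := List.mem_range.mp hk
    rw [pvPairNoll_odd n (2 * k) (by omega) (by omega),
      pvPairNoll_odd n (2 * k + 1) (by omega) (by omega)]
    have e1 : (2 * k) % 2 = 0 := by omega
    have e2 : (2 * k + 1) % 2 = 1 := by omega
    have e3 : (2 * k) / 2 = k := by omega
    have e4 : (2 * k + 1) / 2 = k := by omega
    rw [e1, e2, e3, e4, if_pos rfl, if_neg (by omega : ¬ (1 = 0))]
    simp only [List.cons.injEq, Prod.mk.injEq, and_true, true_and]
    push_cast
    omega

theorem pvRow_fringe (n : Nat) :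
    (List.range (n + 1)).map (fun i => pvPairFringe ((pvTri n + i : Nat) : Int)) =
      pvRowM "fringe" n := by
  unfold pvRowM pvOrderedM
  rw [if_neg (by decide), if_neg (by decide)]
  rcases Nat.even_or_odd n with he | ho
  · obtain ⟨q, hq⟩ := he
    have hmod : PySem.Int.mod (n : Int) 2 = 0 := by
      rw [pvMod2_natCast, show n % 2 = 0 by omega]; rfl
    have hcond : ¬ (PySem.Int.mod (n : Int) 2 ≠ 0) := fun hc => hc hmod
    rw [if_neg hcond, if_pos hmod, PySem.List.foldl_append_eq_flatMap,
      show ((n : Int) + 1) = 2 + 2 * ((q : Nat) : Int) - 1 by push_cast; omega,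
      pvPyRange_two 2 q,
      show n + 1 = 2 * q + 1 by omega, List.range_succ_eq_map, List.map_cons, List.map_map,
      pvRange_two_blocks]
    simp only [List.singleton_append, List.map_cons, List.map_flatMap, List.flatMap_map,
      List.map_nil, Function.comp]
    congr 1
    · rw [pvPairFringe_even n 0 (by omega) (Nat.zero_le n)]
      simp
    · refine List.flatMap_congr (fun k hk => ?_)
      have hkq : k < q := List.mem_range.mp hk
      rw [pvPairFringe_even n (2 * k + 1) (by omega) (by omega),
        pvPairFringe_even n (2 * k + 1 + 1) (by omega) (by omega)]
      have e1 : (2 * k + 1) % 2 = 1 := by omega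
      have e2 : (2 * k + 1 + 1) % 2 = 0 := by omega
      have e3 : (2 * k + 1 + 1) / 2 = k + 1 := by omega
      have e4 : (2 * k + 1 + 1 + 1) / 2 = k + 1 := by omega
      rw [if_neg (by omega : ¬ (2 * k + 1 = 0)), if_neg (by omega : ¬ (2 * k + 1 + 1 = 0)),
        e1, e2, e3, e4, if_pos rfl, if_neg (by omega : ¬ (0 = 1))]
      simp only [List.cons.injEq, Prod.mk.injEq, and_true, true_and]
      push_cast
      omega
  · obtain ⟨q, hq⟩ := ho
    have hmod : PySem.Int.mod (n : Int) 2 = 1 := by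
      rw [pvMod2_natCast, show n % 2 = 1 by omega]; rfl
    have hcond : PySem.Int.mod (n : Int) 2 ≠ 0 := by rw [hmod]; norm_num
    have hcond2 : ¬ (PySem.Int.mod (n : Int) 2 = 0) := hcond
    rw [if_pos hcond, if_neg hcond2, PySem.List.foldl_append_eq_flatMap,
      show ((n : Int) + 1) = 1 + 2 * ((q + 1 : Nat) : Int) - 1 by push_cast; omega,
      pvPyRange_two 1 (q + 1),
      show n + 1 = 2 * (q + 1) by omega, pvRange_two_blocks]
    simp only [List.nil_append, List.map_flatMap, List.flatMap_map, List.map_cons,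
      List.map_nil, Function.comp]
    refine List.flatMap_congr (fun k hk => ?_)
    have hkq : k < q + 1 := List.mem_range.mp hk
    rw [pvPairFringe_odd n (2 * k) (by omega) (by omega),
      pvPairFringe_odd n (2 * k + 1) (by omega) (by omega)]
    have e1 : (2 * k) % 2 = 0 := by omega
    have e2 : (2 * k + 1) % 2 = 1 := by omega
    have e3 : (2 * k) / 2 = k := by omega
    have e4 : (2 * k + 1) / 2 = k := by omega
    rw [e1, e2, e3, e4, if_pos rfl, if_neg (by omega : ¬ (1 = 0))]
    simp only [List.cons.injEq, Prod.mk.injEq, and_true, true_and]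
    push_cast
    omega

theorem pvRow_iso (k : Nat) :
    (List.range (2 * k + 1)).map (fun i => pvPairIso ((k * k + i : Nat) : Int)) =
      pvRowIso k := by
  unfold pvRowIso
  rw [show (2 * (k : Int) + 1) = (2 * (k : Int)) + 1 from rfl,
    PySem.List.pyRange_one_succ_right (by push_cast; omega),
    List.flatMap_append, PySem.List.pyRange_one,
    show ((2 * (k : Int)) - (k : Int)).toNat = k by omega,
    List.range_succ, List.map_append, pvRange_two_blocks]
  simp only [List.flatMap_map, List.flatMap_cons, List.flatMap_nil, List.append_nil,
    List.map_cons, List.map_nil, Function.comp]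
  congr 1
  · refine List.flatMap_congr (fun j hj => ?_)
    have hjk : j < k := List.mem_range.mp hj
    rw [pvPairIso_eq k (2 * j) (by omega), pvPairIso_eq k (2 * j + 1) (by omega)]
    have e1 : (2 * j) % 2 = 0 := by omega
    have e2 : (2 * j + 1) % 2 = 1 := by omega
    have e3 : (2 * j) / 2 = j := by omega
    have e4 : (2 * j + 1) / 2 = j := by omega
    rw [e1, e2, e3, e4, if_neg (by omega : ¬ (0 = 1)), if_pos rfl]
    unfold pvChunk
    rw [if_neg (by push_cast; omega : ¬ (2 * (k : Int) - ((k : Int) + (j : Nat)) = 0))]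
    simp only [List.cons.injEq, Prod.mk.injEq, true_and, and_true]
    push_cast
    omega
  · rw [pvPairIso_eq k (2 * k) (by omega)]
    have e1 : (2 * k) % 2 = 0 := by omega
    have e3 : (2 * k) / 2 = k := by omega
    rw [e1, e3, if_neg (by omega : ¬ (0 = 1))]
    unfold pvChunk
    rw [if_pos (by push_cast; omega : (2 * (k : Int) - 2 * (k : Int) = 0))]
    simp only [List.cons.injEq, Prod.mk.injEq, true_and, and_true]
    push_cast
    omega


-- ---------- concatenated enumerations and their lengths ----------

def pvConcatM (key : String) (N : Nat) : List (Int × Int) := (List.range N).flatMap (pvRowM key)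

def pvConcatIso (N : Nat) : List (Int × Int) := (List.range N).flatMap pvRowIso

theorem pvConcat_succ (row : Nat → List (Int × Int)) (N : Nat) :
    (List.range (N + 1)).flatMap row = (List.range N).flatMap row ++ row N := by
  rw [List.range_succ, List.flatMap_append]
  simp

theorem pvRowM_length (key : String) (hkey : key = "ansi" ∨ key = "noll" ∨ key = "fringe")
    (n : Nat) : (pvRowM key n).length = n + 1 := by
  rcases hkey with h | h | h <;> subst h
  · rw [← pvRow_ansi]; simp
  · rw [← pvRow_noll]; simp
  · rw [← pvRow_fringe]; simp

theorem pvRowIso_length (k : Nat) : (pvRowIso k).length = 2 * k + 1 := by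
  rw [← pvRow_iso]; simp

theorem pvConcatM_length (key : String) (hkey : key = "ansi" ∨ key = "noll" ∨ key = "fringe")
    (N : Nat) : (pvConcatM key N).length = pvTri N := by
  induction N with
  | zero => simp [pvConcatM, pvTri]
  | succ n ih =>
    unfold pvConcatM at *
    rw [pvConcat_succ, List.length_append, ih, pvRowM_length key hkey n, pvTri_succ]

theorem pvConcatIso_length (N : Nat) : (pvConcatIso N).length = N * N := by
  induction N with
  | zero => simp [pvConcatIso]
  | succ n ih =>
    unfold pvConcatIso at *
    rw [pvConcat_succ, List.length_append, ih, pvRowIso_length n]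
    have h : (n + 1) * (n + 1) = n * n + (2 * n + 1) := by ring
    omega

theorem pvTri_mono {a b : Nat} (h : a ≤ b) : pvTri a ≤ pvTri b := by
  induction b, h using Nat.le_induction with
  | base => exact le_refl _
  | succ b hb ih => rw [pvTri_succ]; omega

-- ---------- B equals the truncated concatenation ----------

theorem pvMaster (pair : Int → Int × Int) (row : Nat → List (Int × Int))
    (hrow : ∀ n, (List.range ((row n).length)).map
        (fun i => pair (((((List.range n).flatMap row).length) + i : Nat) : Int)) = row n) :
    ∀ N, (List.range (((List.range N).flatMap row).length)).map (fun j => pair ((j : Nat) : Int))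
      = (List.range N).flatMap row := by
  intro N
  induction N with
  | zero => simp
  | succ n ih =>
    rw [pvConcat_succ, List.length_append, List.range_add, List.map_append, ih]
    congr 1
    rw [List.map_map]
    exact hrow n

theorem pvMasterM (key : String) (hkey : key = "ansi" ∨ key = "noll" ∨ key = "fringe")
    (pair : Int → Int × Int)
    (hrow : ∀ n, (List.range (n + 1)).map (fun i => pair ((pvTri n + i : Nat) : Int))
      = pvRowM key n) :
    ∀ N, (List.range ((pvConcatM key N).length)).map (fun j => pair ((j : Nat) : Int))
      = pvConcatM key N := by
  refine pvMaster pair (pvRowM key) (fun n => ?_)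
  rw [show ((List.range n).flatMap (pvRowM key)).length = pvTri n from
      pvConcatM_length key hkey n,
    pvRowM_length key hkey n]
  exact hrow n

theorem pvMasterIso :
    ∀ N, (List.range ((pvConcatIso N).length)).map (fun j => pvPairIso ((j : Nat) : Int))
      = pvConcatIso N := by
  refine pvMaster pvPairIso pvRowIso (fun n => ?_)
  rw [show ((List.range n).flatMap pvRowIso).length = n * n from pvConcatIso_length n,
    pvRowIso_length n]
  exact pvRow_iso n

-- (pyRange 0 T 1).map pair, rewritten through the master lemma, is a take of the concatenation
theorem pvMap_eq_take (pair : Int → Int × Int) (row : Nat → List (Int × Int)) (T : Int)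
    (hT : 0 < T)
    (hmaster : (List.range (((List.range T.toNat).flatMap row).length)).map
        (fun j => pair ((j : Nat) : Int)) = (List.range T.toNat).flatMap row)
    (hcnt : T.toNat ≤ ((List.range T.toNat).flatMap row).length) :
    (PySem.List.pyRange 0 T 1).map pair = ((List.range T.toNat).flatMap row).take T.toNat := by
  rw [← hmaster, ← List.map_take, List.take_range, min_eq_left hcnt,
    PySem.List.pyRange_one, List.map_map]
  simp [Function.comp]

-- ---------- A's loops equal the truncated concatenation ----------

theorem pv_take_all {p : List (Int × Int)} {T : Int} (h : (p.length : Int) < T) :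
    p.take T.toNat = p :=
  List.take_of_length_le (by omega)

theorem pv_take_left {p q : List (Int × Int)} {T : Int} (h : (p.length : Int) = T) :
    (p ++ q).take T.toNat = p :=
  List.take_left' (by omega)

-- A's inner loop = append-then-truncate
theorem pvInnerA_eq (n T : Int) (ms : List Int) (pairs : List (Int × Int))
    (h : (pairs.length : Int) < T) :
    pvInnerA n T pairs ms = (pairs ++ ms.map (fun m => (n, m))).take T.toNat := by
  induction ms generalizing pairs with
  | nil => simp [pvInnerA, pv_take_all h]
  | cons m ms ih =>
    simp only [pvInnerA]
    split
    · rename_i heq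
      rw [List.map_cons, show pairs ++ (n, m) :: ms.map (fun m => (n, m)) =
            (pairs ++ [(n, m)]) ++ ms.map (fun m => (n, m)) by simp]
      exact (pv_take_left heq).symm
    · rename_i hne
      have hlt : ((pairs ++ [(n, m)]).length : Int) < T := by
        simp only [List.length_append, List.length_cons, List.length_nil] at *
        push_cast at *
        omega
      rw [ih _ hlt]
      congr 1
      simp

-- _iso_pairs' inner loop = append-then-truncate (chunks of one or two pairs)
theorem pvInnerIso_eq (no T : Int) (ns : List Int) (pairs : List (Int × Int))
    (h : (pairs.length : Int) < T) :
    pvInnerIso no T pairs ns = (pairs ++ ns.flatMap (pvChunk no)).take T.toNat := by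
  induction ns generalizing pairs with
  | nil => simp [pvInnerIso, pv_take_all h]
  | cons n ns ih =>
    simp only [pvInnerIso, List.flatMap_cons, pvChunk]
    by_cases heq : ((pairs ++ [(n, no - n)]).length : Int) = T
    · rw [if_pos heq]
      by_cases hm : no - n = 0
      · rw [if_pos hm, show pairs ++ ([(n, no - n)] ++ ns.flatMap (pvChunk no)) =
            (pairs ++ [(n, no - n)]) ++ ns.flatMap (pvChunk no) by simp,
          pv_take_left heq]
      · rw [if_neg hm, show pairs ++ ([(n, no - n), (n, -(no - n))] ++ ns.flatMap (pvChunk no)) =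
            (pairs ++ [(n, no - n)]) ++ ([(n, -(no - n))] ++ ns.flatMap (pvChunk no)) by simp,
          pv_take_left heq]
    · rw [if_neg heq]
      have h1 : ((pairs ++ [(n, no - n)]).length : Int) < T := by
        simp only [List.length_append, List.length_cons, List.length_nil] at *
        push_cast at *; omega
      by_cases hm : no - n = 0
      · simp only [hm, ne_eq, not_true_eq_false, if_false]
        rw [ih _ (by simpa [hm] using h1)]
        congr 1
        simp
      · simp only [ne_eq, hm, not_false_eq_true, if_true, if_false]
        by_cases heq2 : (((pairs ++ [(n, no - n)]) ++ [(n, -(no - n))]).length : Int) = T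
        · rw [if_pos heq2, show pairs ++ ([(n, no - n), (n, -(no - n))] ++ ns.flatMap (pvChunk no)) =
              ((pairs ++ [(n, no - n)]) ++ [(n, -(no - n))]) ++ ns.flatMap (pvChunk no) by simp,
            pv_take_left heq2]
        · rw [if_neg heq2]
          have h2 : (((pairs ++ [(n, no - n)]) ++ [(n, -(no - n))]).length : Int) < T := by
            simp only [List.length_append, List.length_cons, List.length_nil] at *
            push_cast at *; omega
          rw [ih _ h2]
          congr 1
          simp

-- A's outer loop (ansi / noll / fringe) computes the truncated concatenation
theorem pvLoopA_char (key : String) (hkey : key = "ansi" ∨ key = "noll" ∨ key = "fringe")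
    (T : Int) (hT : 0 < T) :
    ∀ (fuel N K : Nat), N ≤ K → T ≤ ((pvConcatM key K).length : Int) →
      (T - (pvConcatM key N).length).toNat ≤ fuel →
      pvLoopA key T ((pvConcatM key N).take T.toNat) (N : Int) =
        (pvConcatM key K).take T.toNat := by
  intro fuel
  induction fuel with
  | zero =>
    intro N K hNK hK hf
    have hge : ¬ (((pvConcatM key N).length : Int) < T) := by omega
    have hlen : ¬ ((((pvConcatM key N).take T.toNat).length : Int) < T) := by
      simp only [List.length_take]
      omega
    rw [pvLoopA, dif_neg hlen]
    unfold pvConcatM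
    rw [show K = N + (K - N) by omega, List.range_add, List.flatMap_append,
      List.take_append_of_le_length (by unfold pvConcatM at hge; omega)]
  | succ f ih =>
    intro N K hNK hK hf
    by_cases h : ((pvConcatM key N).length : Int) < T
    · have htake : (pvConcatM key N).take T.toNat = pvConcatM key N := pv_take_all h
      have hrow : pvOrderedM key (N : Int) ≠ [] := by
        intro h0
        have hl := pvRowM_length key hkey N
        unfold pvRowM at hl
        rw [h0] at hl
        simp at hl
      have hNK' : N + 1 ≤ K := by
        rcases Nat.lt_or_ge N K with hlt | hge'
        · omega
        · exfalso
          have := pvTri_mono hge'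
          rw [pvConcatM_length key hkey N, pvConcatM_length key hkey K] at *
          omega
      rw [pvLoopA, htake, dif_pos h, if_pos hkey, dif_neg hrow,
        pvInnerA_eq (N : Int) T _ (pvConcatM key N) h]
      have hjoin : pvConcatM key N ++ (pvOrderedM key (N : Int)).map (fun m => ((N : Int), m))
          = pvConcatM key (N + 1) := by
        unfold pvConcatM
        rw [pvConcat_succ]
        rfl
      rw [hjoin, show ((N : Int) + 1) = ((N + 1 : Nat) : Int) by push_cast; ring]
      refine ih (N + 1) K hNK' hK ?_
      have h1 := pvRowM_length key hkey N
      have h2 : (pvConcatM key (N + 1)).length = (pvConcatM key N).length + (N + 1) := by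
        unfold pvConcatM
        rw [pvConcat_succ, List.length_append, pvRowM_length key hkey N]
      omega
    · have hlen : ¬ ((((pvConcatM key N).take T.toNat).length : Int) < T) := by
        simp only [List.length_take]
        omega
      rw [pvLoopA, dif_neg hlen]
      unfold pvConcatM
      rw [show K = N + (K - N) by omega, List.range_add, List.flatMap_append,
        List.take_append_of_le_length (by unfold pvConcatM at h; omega)]

-- _iso_pairs' outer loop computes the truncated concatenation
theorem pvLoopIso_char (T : Int) (hT : 0 < T) :
    ∀ (fuel N K : Nat), N ≤ K → T ≤ ((pvConcatIso K).length : Int) →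
      (T - (pvConcatIso N).length).toNat ≤ fuel →
      pvLoopIso T ((pvConcatIso N).take T.toNat) (2 * (N : Int)) =
        (pvConcatIso K).take T.toNat := by
  intro fuel
  induction fuel with
  | zero =>
    intro N K hNK hK hf
    have hge : ¬ (((pvConcatIso N).length : Int) < T) := by omega
    have hlen : ¬ ((((pvConcatIso N).take T.toNat).length : Int) < T) := by
      simp only [List.length_take]
      omega
    rw [pvLoopIso, dif_neg hlen]
    unfold pvConcatIso
    rw [show K = N + (K - N) by omega, List.range_add, List.flatMap_append,
      List.take_append_of_le_length (by unfold pvConcatIso at hge; omega)]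
  | succ f ih =>
    intro N K hNK hK hf
    have hfd : PySem.Int.floordiv (2 * (N : Int)) 2 = (N : Int) := by
      rw [PySem.Int.floordiv_eq_ediv_of_pos (by norm_num)]
      omega
    by_cases h : ((pvConcatIso N).length : Int) < T
    · have htake : (pvConcatIso N).take T.toNat = pvConcatIso N := pv_take_all h
      have hrng : PySem.List.pyRange (PySem.Int.floordiv (2 * (N : Int)) 2)
          (2 * (N : Int) + 1) 1 ≠ [] := by
        rw [hfd]
        apply List.ne_nil_of_length_pos
        rw [PySem.List.length_pyRange_one]
        omega
      have hNK' : N + 1 ≤ K := by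
        rcases Nat.lt_or_ge N K with hlt | hge'
        · omega
        · exfalso
          have hm : K * K ≤ N * N := Nat.mul_le_mul hge' hge'
          rw [pvConcatIso_length] at *
          omega
      rw [pvLoopIso, htake, dif_pos h, dif_neg hrng,
        pvInnerIso_eq (2 * (N : Int)) T _ (pvConcatIso N) h, hfd]
      have hjoin : pvConcatIso N ++
          (PySem.List.pyRange (N : Int) (2 * (N : Int) + 1) 1).flatMap (pvChunk (2 * (N : Int)))
          = pvConcatIso (N + 1) := by
        unfold pvConcatIso
        rw [pvConcat_succ]
        rfl
      rw [hjoin, show (2 * (N : Int) + 2) = 2 * ((N + 1 : Nat) : Int) by push_cast; ring]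
      refine ih (N + 1) K hNK' hK ?_
      have h2 : (pvConcatIso (N + 1)).length = (pvConcatIso N).length + (2 * N + 1) := by
        unfold pvConcatIso
        rw [pvConcat_succ, List.length_append, pvRowIso_length N]
      omega
    · have hlen : ¬ ((((pvConcatIso N).take T.toNat).length : Int) < T) := by
        simp only [List.length_take]
        omega
      rw [pvLoopIso, dif_neg hlen]
      unfold pvConcatIso
      rw [show K = N + (K - N) by omega, List.range_add, List.flatMap_append,
        List.take_append_of_le_length (by unfold pvConcatIso at h; omega)]

-- ===== VERDICT (by name: the statement is the Claim_ definition above) =====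
-- assembling one ansi/noll/fringe branch
theorem pvSpec_keyM (key : String) (hkey : key = "ansi" ∨ key = "noll" ∨ key = "fringe")
    (pair : Int → Int × Int)
    (hrow : ∀ n, (List.range (n + 1)).map (fun i => pair ((pvTri n + i : Nat) : Int))
      = pvRowM key n)
    (T : Int) (hT : 0 < T) :
    pvLoopA key T [] 0 = (PySem.List.pyRange 0 T 1).map pair := by
  have hK : T ≤ ((pvConcatM key T.toNat).length : Int) := by
    rw [pvConcatM_length key hkey]
    have := pvTri_ge T.toNat
    omega
  have hA := pvLoopA_char key hkey T hT T.toNat 0 T.toNat (Nat.zero_le _) hK (by simp)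
  simp only [pvConcatM, List.range_zero, List.flatMap_nil, List.take_nil, Nat.cast_zero] at hA
  rw [hA]
  refine (pvMap_eq_take pair (pvRowM key) T hT (pvMasterM key hkey pair hrow T.toNat) ?_).symm
  have h2 := pvConcatM_length key hkey T.toNat
  have := pvTri_ge T.toNat
  unfold pvConcatM at h2
  omega

theorem zernike_index_pairs_py_spec : Claim_equal_zernike_index_pairs_py := by
  intro indexing T _ hpre
  unfold Spec_zernike_index_pairs_py zernike_index_pairs_py zernike_index_pairs_py_alt
  by_cases hT : T ≤ 0
  · rw [if_pos hT]
    have hnlt : ¬ ((([] : List (Int × Int)).length : Int) < T) := by simp; omega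
    by_cases hiso : PySem.Str.lower indexing = "iso"
    · simp only [hiso, if_pos]
      rw [pvLoopIso, dif_neg hnlt]
    · simp only [hiso, if_false]
      rw [pvLoopA, dif_neg hnlt]
  · rw [if_neg hT]
    have hT' : (0 : Int) < T := by omega
    rcases hpre with h0 | hkey | hkey | hkey | hkey
    · omega
    · -- iso
      simp only [hkey, String.reduceEq, reduceIte]
      have hK : T ≤ ((pvConcatIso T.toNat).length : Int) := by
        rw [pvConcatIso_length]
        have := pvSq_ge T.toNat
        omega
      have hA := pvLoopIso_char T hT' T.toNat 0 T.toNat (Nat.zero_le _) hK (by simp)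
      simp only [pvConcatIso, List.range_zero, List.flatMap_nil, List.take_nil,
        Nat.cast_zero, mul_zero] at hA
      rw [hA]
      refine (pvMap_eq_take pvPairIso pvRowIso T hT' (pvMasterIso T.toNat) ?_).symm
      have h2 := pvConcatIso_length T.toNat
      have := pvSq_ge T.toNat
      unfold pvConcatIso at h2
      omega
    · -- ansi
      simp only [hkey, String.reduceEq, reduceIte]
      exact pvSpec_keyM "ansi" (Or.inl rfl) pvPairAnsi pvRow_ansi T hT'
    · -- noll
      simp only [hkey, String.reduceEq, reduceIte]
      exact pvSpec_keyM "noll" (Or.inr (Or.inl rfl)) pvPairNoll pvRow_noll T hT'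
    · -- fringe
      simp only [hkey, String.reduceEq, reduceIte]
      exact pvSpec_keyM "fringe" (Or.inr (Or.inr rfl)) pvPairFringe pvRow_fringe T hT'
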